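-- pv_equiv track=rewrite | github.com/teddyjfpender/clean | scripts/utils/check_backend_parity.py | canonicalize_type
-- ===== SOURCE A (Python) =====
-- CANONICAL_PRIMITIVES = {
--     "felt252": "felt252",
--     "core::felt252": "felt252",
--     "u128": "u128",
--     "u256": "u256",
--     "bool": "bool",
--     "core::bool": "bool",
--     "i8": "i8",
--     "i16": "i16",
--     "i32": "i32",
--     "i64": "i64",
--     "i128": "i128",
--     "u8": "u8",
--     "u16": "u16",
--     "u32": "u32",
--     "u64": "u64",
--     "qm31": "qm31",
--     "core::integer::u128": "u128",
--     "core::integer::u256": "u256",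
--     "core::integer::i8": "i8",
--     "core::integer::i16": "i16",
--     "core::integer::i32": "i32",
--     "core::integer::i64": "i64",
--     "core::integer::i128": "i128",
--     "core::integer::u8": "u8",
--     "core::integer::u16": "u16",
--     "core::integer::u32": "u32",
--     "core::integer::u64": "u64",
--     "core::qm31": "qm31",
--     "RangeCheck": "RangeCheck",
--     "GasBuiltin": "GasBuiltin",
--     "SegmentArena": "SegmentArena",
--     "PanicSignal": "PanicSignal",
--     "core::range_check::RangeCheck": "RangeCheck",
--     "core::gas::GasBuiltin": "GasBuiltin",
--     "core::segment_arena::SegmentArena": "SegmentArena",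
--     "core::panic::PanicSignal": "PanicSignal",
-- }
--
-- def split_top_level_generic(type_name: str) -> tuple[str, list[str]] | None:
--     start = type_name.find("<")
--     if start == -1 or not type_name.endswith(">"):
--         return None
--     base = type_name[:start]
--     inner = type_name[start + 1 : -1]
--     args: list[str] = []
--     depth = 0
--     current: list[str] = []
--     for ch in inner:
--         if ch == "<":
--             depth += 1
--             current.append(ch)
--             continue
--         if ch == ">":
--             depth -= 1
--             current.append(ch)
--             continue
--         if ch == "," and depth == 0:
--             arg = "".join(current).strip()
--             if arg:
--                 args.append(arg)
--             current = []
--             continue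
--         current.append(ch)
--     tail = "".join(current).strip()
--     if tail:
--         args.append(tail)
--     return base, args
--
-- def canonicalize_base(base: str) -> str:
--     normalized = base.replace(" ", "")
--     if normalized in CANONICAL_PRIMITIVES:
--         return CANONICAL_PRIMITIVES[normalized]
--     if "::" in normalized:
--         return normalized.split("::")[-1]
--     return normalized
--
-- def canonicalize_type(type_name: str) -> str:
--     normalized = type_name.replace("::<", "<").replace(" ", "")
--     split = split_top_level_generic(normalized)
--     if split is None:
--         return canonicalize_base(normalized)
--     base, args = split
--     rendered_args = [canonicalize_type(arg) for arg in args]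
--     return f"{canonicalize_base(base)}<{', '.join(rendered_args)}>"
-- ===== SOURCE B (Python) =====
-- CANONICAL_PRIMITIVES = {
--     "felt252": "felt252",
--     "core::felt252": "felt252",
--     "u128": "u128",
--     "u256": "u256",
--     "bool": "bool",
--     "core::bool": "bool",
--     "i8": "i8",
--     "i16": "i16",
--     "i32": "i32",
--     "i64": "i64",
--     "i128": "i128",
--     "u8": "u8",
--     "u16": "u16",
--     "u32": "u32",
--     "u64": "u64",
--     "qm31": "qm31",
--     "core::integer::u128": "u128",
--     "core::integer::u256": "u256",
--     "core::integer::i8": "i8",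
--     "core::integer::i16": "i16",
--     "core::integer::i32": "i32",
--     "core::integer::i64": "i64",
--     "core::integer::i128": "i128",
--     "core::integer::u8": "u8",
--     "core::integer::u16": "u16",
--     "core::integer::u32": "u32",
--     "core::integer::u64": "u64",
--     "core::qm31": "qm31",
--     "RangeCheck": "RangeCheck",
--     "GasBuiltin": "GasBuiltin",
--     "SegmentArena": "SegmentArena",
--     "PanicSignal": "PanicSignal",
--     "core::range_check::RangeCheck": "RangeCheck",
--     "core::gas::GasBuiltin": "GasBuiltin",
--     "core::segment_arena::SegmentArena": "SegmentArena",
--     "core::panic::PanicSignal": "PanicSignal",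
-- }
--
--
-- def _canon_base(base: str) -> str:
--     normalized = base.replace(" ", "")
--     if normalized in CANONICAL_PRIMITIVES:
--         return CANONICAL_PRIMITIVES[normalized]
--     if "::" in normalized:
--         return normalized.split("::")[-1]
--     return normalized
--
--
-- def _parse(s: str):
--     """Parse a normalized type string into an explicit tree:
--     ("leaf", s) or ("node", base, children)."""
--     i = s.find("<")
--     if i == -1 or not s.endswith(">"):
--         return ("leaf", s)
--     inner = s[i + 1 : -1]
--     children = []
--     depth = 0
--     start = 0
--     for j, ch in enumerate(inner):
--         if ch == "<":
--             depth += 1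
--         elif ch == ">":
--             depth -= 1
--         elif ch == "," and depth == 0:
--             piece = inner[start:j].strip()
--             if piece:
--                 # arguments are re-normalized before parsing
--                 children.append(_parse(piece.replace("::<", "<").replace(" ", "")))
--             start = j + 1
--     piece = inner[start:].strip()
--     if piece:
--         children.append(_parse(piece.replace("::<", "<").replace(" ", "")))
--     return ("node", s[:i], children)
--
--
-- def _render(tree) -> str:
--     if tree[0] == "leaf":
--         return _canon_base(tree[1])
--     _, base, children = tree
--     return _canon_base(base) + "<" + ", ".join(_render(c) for c in children) + ">"
--
--
-- def canonicalize_type(type_name: str) -> str: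
--     normalized = type_name.replace("::<", "<").replace(" ", "")
--     return _render(_parse(normalized))
-- ===== Notes on version B (the rewrite author's own statement) =====
-- stated objective: alternative
-- what changed: A interleaves splitting and formatting in one recursive function whose splitter accumulates a character buffer; B is a two-phase parse-to-explicit-tree / render pipeline whose splitter walks (index, char) pairs and cuts argument pieces out of the string by slicing, never maintaining a buffer.
import Mathlib
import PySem

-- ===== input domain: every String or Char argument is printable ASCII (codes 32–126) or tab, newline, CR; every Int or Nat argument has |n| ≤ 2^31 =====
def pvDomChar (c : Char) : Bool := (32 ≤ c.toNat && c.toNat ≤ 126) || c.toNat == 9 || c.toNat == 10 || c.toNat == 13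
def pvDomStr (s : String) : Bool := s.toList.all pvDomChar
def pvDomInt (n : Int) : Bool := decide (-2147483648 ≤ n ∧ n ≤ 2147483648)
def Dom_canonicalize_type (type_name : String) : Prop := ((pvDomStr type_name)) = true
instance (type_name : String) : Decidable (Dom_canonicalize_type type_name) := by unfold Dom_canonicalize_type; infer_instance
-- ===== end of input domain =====

-- B replaces A's interleaved split-and-format recursion by a two-phase parse-to-tree /
-- render pipeline whose splitter walks indices and slices instead of accumulating a
-- character buffer (objective: alternative — same cost, different structure).

-- Module-level constant shared by both programs (data, not algorithm).
def CANONICAL_PRIMITIVES : PySem.Dict String String := PySem.Dict.ofList [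
  ("felt252", "felt252"), ("core::felt252", "felt252"),
  ("u128", "u128"), ("u256", "u256"),
  ("bool", "bool"), ("core::bool", "bool"),
  ("i8", "i8"), ("i16", "i16"), ("i32", "i32"), ("i64", "i64"), ("i128", "i128"),
  ("u8", "u8"), ("u16", "u16"), ("u32", "u32"), ("u64", "u64"),
  ("qm31", "qm31"),
  ("core::integer::u128", "u128"), ("core::integer::u256", "u256"),
  ("core::integer::i8", "i8"), ("core::integer::i16", "i16"),
  ("core::integer::i32", "i32"), ("core::integer::i64", "i64"),
  ("core::integer::i128", "i128"),
  ("core::integer::u8", "u8"), ("core::integer::u16", "u16"),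
  ("core::integer::u32", "u32"), ("core::integer::u64", "u64"),
  ("core::qm31", "qm31"),
  ("RangeCheck", "RangeCheck"), ("GasBuiltin", "GasBuiltin"),
  ("SegmentArena", "SegmentArena"), ("PanicSignal", "PanicSignal"),
  ("core::range_check::RangeCheck", "RangeCheck"),
  ("core::gas::GasBuiltin", "GasBuiltin"),
  ("core::segment_arena::SegmentArena", "SegmentArena"),
  ("core::panic::PanicSignal", "PanicSignal")]

-- canonicalize_base, textually identical in both programs (a module helper both use).
def canonicalizeBase (base : String) : String :=
  let normalized := PySem.Str.replace base " " ""
  match PySem.Dict.get? CANONICAL_PRIMITIVES normalized with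
  | some v => v
  | none =>
    if PySem.Str.isIn "::" normalized then
      -- normalized.split("::")[-1]; split? is some (sep ≠ "") and never returns [],
      -- so the [-1] never raises and the defaults are dead.
      (PySem.List.pyGet? ((PySem.Str.split? normalized "::").getD []) (-1)).getD ""
    else normalized

-- the normalization both programs apply: replace "::<" -> "<", then remove spaces
def normalizeTy (s : String) : String :=
  PySem.Str.replace (PySem.Str.replace s "::<" "<") " " ""

-- ===== PORT A =====
-- loop body of split_top_level_generic: state (args, current, depth)
def stepA (st : List String × List Char × Int) (ch : Char) : List String × List Char × Int :=
  let (args, current, depth) := st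
  if ch = '<' then (args, current ++ [ch], depth + 1)
  else if ch = '>' then (args, current ++ [ch], depth - 1)
  else if ch = ',' ∧ depth = 0 then
    let arg := PySem.Str.strip (String.ofList current)
    ((if arg ≠ "" then args ++ [arg] else args), [], depth)
  else (args, current ++ [ch], depth)

def split_top_level_generic (type_name : String) : Option (String × List String) :=
  let start := PySem.Str.find type_name "<"
  if start = -1 ∨ ¬ PySem.Str.endswith type_name ">" then none
  else
    let base := PySem.Str.slice type_name none (some start)
    let inner := PySem.Str.slice type_name (some (start + 1)) (some (-1))
    let res := inner.toList.foldl stepA ([], [], 0)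
    let tail := PySem.Str.strip (String.ofList res.2.1)
    some (base, if tail ≠ "" then res.1 ++ [tail] else res.1)

-- fuel = length + 1 makes the recursion structural; each recursive argument is at
-- least two characters shorter than its parent, so the 0-fuel branch is unreachable.
def canonTypeGo : Nat → String → String
  | 0, _ => ""
  | (fuel+1), type_name =>
    let normalized := normalizeTy type_name
    match split_top_level_generic normalized with
    | none => canonicalizeBase normalized
    | some (base, args) =>
        canonicalizeBase base ++ "<" ++
          PySem.Str.join ", " (args.map (canonTypeGo fuel)) ++ ">"

def canonicalize_type (type_name : String) : String :=
  canonTypeGo (type_name.toList.length + 1) type_name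

-- ===== PORT B =====
-- explicit parse tree ("leaf", s) / ("node", base, children)
mutual
inductive Ty : Type where
  | leaf : String → Ty
  | node : String → TyList → Ty
  deriving Repr, DecidableEq
inductive TyList : Type where
  | nil : TyList
  | cons : Ty → TyList → TyList
  deriving Repr, DecidableEq
end

def TyList.ofList : List Ty → TyList
  | [] => .nil
  | t :: ts => .cons t (TyList.ofList ts)

-- loop body of _parse: state (children, depth, start); walks (index, char) pairs and
-- cuts argument pieces out of `inner` by slicing, parsing each with `h`.
def stepB (inner : String) (h : String → Ty) (st : List Ty × Int × Int)
    (jc : Int × Char) : List Ty × Int × Int :=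
  let (children, depth, start) := st
  let (j, ch) := jc
  if ch = '<' then (children, depth + 1, start)
  else if ch = '>' then (children, depth - 1, start)
  else if ch = ',' ∧ depth = 0 then
    let piece := PySem.Str.strip (PySem.Str.slice inner (some start) (some j))
    ((if piece ≠ "" then children ++ [h piece] else children), depth, j + 1)
  else (children, depth, start)

def parseB : Nat → String → Ty
  | 0, _ => .leaf ""  -- unreachable: fuel = length + 1 always suffices
  | (fuel+1), s =>
    let i := PySem.Str.find s "<"
    if i = -1 ∨ ¬ PySem.Str.endswith s ">" then .leaf s
    else
      let inner := PySem.Str.slice s (some (i + 1)) (some (-1))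
      let res := (PySem.List.enumerate inner.toList).foldl
        (stepB inner (fun p => parseB fuel (normalizeTy p))) ([], 0, 0)
      let piece := PySem.Str.strip (PySem.Str.slice inner (some res.2.2) none)
      .node (PySem.Str.slice s none (some i))
        (TyList.ofList (if piece ≠ "" then res.1 ++ [parseB fuel (normalizeTy piece)] else res.1))

mutual
def renderB : Ty → String
  | .leaf s => canonicalizeBase s
  | .node base children =>
      canonicalizeBase base ++ "<" ++ PySem.Str.join ", " (renderList children) ++ ">"
def renderList : TyList → List String
  | .nil => []
  | .cons t ts => renderB t :: renderList ts
end

def canonicalize_type_alt (type_name : String) : String :=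
  let normalized := normalizeTy type_name
  renderB (parseB (type_name.toList.length + 1) normalized)

-- ===== PRECONDITION & SPEC =====
def Spec_canonicalize_type (type_name : String) (out : String) : Prop := out = canonicalize_type_alt type_name
instance (type_name : String) (out : String) : Decidable (Spec_canonicalize_type type_name out) := by unfold Spec_canonicalize_type; infer_instance

-- ===== CLAIM (what is proved, stated in full; the proofs are below) =====
def Claim_equal_canonicalize_type : Prop := ∀ (type_name : String), Dom_canonicalize_type type_name → Spec_canonicalize_type type_name (canonicalize_type type_name)

-- ===== LEMMAS AND PROOFS =====

theorem renderList_ofList (l : List Ty) :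
    renderList (TyList.ofList l) = l.map renderB := by
  induction l with
  | nil => rfl
  | cons t ts ih => simp [TyList.ofList, renderList, ih]

theorem enumerate_cons {α : Type} (c : α) (cs : List α) (j : Int) :
    PySem.List.enumerate (c :: cs) j = (j, c) :: PySem.List.enumerate cs (j + 1) := by
  simp only [PySem.List.enumerate]

-- loop invariant relating A's buffer-accumulating split to B's index/slice split
theorem split_loop_rel (inner : String) (h : String → Ty) :
    ∀ (cs pre : List Char) (args : List String) (depth : Int) (start : Nat),
    inner.toList = pre ++ cs → start ≤ pre.length →
    (let resA := cs.foldl stepA (args, pre.drop start, depth)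
     let tail := PySem.Str.strip (String.ofList resA.2.1)
     let resB := (PySem.List.enumerate cs (pre.length : Int)).foldl (stepB inner h)
        (args.map h, depth, (start : Int))
     let piece := PySem.Str.strip (PySem.Str.slice inner (some resB.2.2) none)
     (if piece ≠ "" then resB.1 ++ [h piece] else resB.1) =
       (if tail ≠ "" then resA.1 ++ [tail] else resA.1).map h) := by
  intro cs
  induction cs with
  | nil =>
    intro pre args depth start hfull hstart
    have hsl : PySem.Str.slice inner (some (start : Int)) none
        = String.ofList (pre.drop start) := by
      apply String.toList_inj.mp
      simp only [PySem.Str.toList_slice, PySem.Chars.slice_eq_listSlice,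
        PySem.List.slice_from_natCast, String.toList_ofList]
      rw [hfull]; simp
    simp only [List.foldl_nil, PySem.List.enumerate, hsl]
    split_ifs <;> simp [List.map_append]
  | cons c cs ih =>
    intro pre args depth start hfull hstart
    have hfull' : inner.toList = (pre ++ [c]) ++ cs := by rw [hfull]; simp
    have hlen : ((pre.length : Int) + 1) = (((pre ++ [c]).length : Nat) : Int) := by simp
    rw [enumerate_cons]
    simp only [List.foldl_cons]
    by_cases h1 : c = '<'
    · simp only [stepA, stepB, if_pos h1]
      rw [show pre.drop start ++ [c] = (pre ++ [c]).drop start from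
        (List.drop_append_of_le_length hstart).symm, hlen]
      exact ih (pre ++ [c]) args (depth + 1) start hfull' (le_trans hstart (by simp))
    by_cases h2 : c = '>'
    · simp only [stepA, stepB, if_neg h1, if_pos h2]
      rw [show pre.drop start ++ [c] = (pre ++ [c]).drop start from
        (List.drop_append_of_le_length hstart).symm, hlen]
      exact ih (pre ++ [c]) args (depth - 1) start hfull' (le_trans hstart (by simp))
    by_cases h3 : c = ',' ∧ depth = 0
    · simp only [stepA, stepB, if_neg h1, if_neg h2, if_pos h3]
      have hpiece : PySem.Str.strip (PySem.Str.slice inner (some (start : Int))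
          (some (pre.length : Int)))
          = PySem.Str.strip (String.ofList (pre.drop start)) := by
        congr 1
        apply String.toList_inj.mp
        simp only [PySem.Str.toList_slice, PySem.Chars.slice_eq_listSlice,
          PySem.List.slice_natCast, String.toList_ofList]
        rw [hfull, List.drop_append_of_le_length hstart]
        exact List.take_left' (by simp)
      rw [hpiece]
      rw [show (if PySem.Str.strip (String.ofList (pre.drop start)) ≠ "" then
            List.map h args ++ [h (PySem.Str.strip (String.ofList (pre.drop start)))]
          else List.map h args)
          = List.map h (if PySem.Str.strip (String.ofList (pre.drop start)) ≠ "" then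
            args ++ [PySem.Str.strip (String.ofList (pre.drop start))] else args) by
        split_ifs <;> simp]
      rw [show ([] : List Char) = (pre ++ [c]).drop ((pre ++ [c]).length) by simp]
      rw [show ((pre.length : Int) + 1) = (((pre ++ [c]).length : Nat) : Int) by simp]
      exact ih (pre ++ [c])
        (if PySem.Str.strip (String.ofList (pre.drop start)) ≠ "" then
          args ++ [PySem.Str.strip (String.ofList (pre.drop start))] else args)
        depth ((pre ++ [c]).length) hfull' le_rfl
    · simp only [stepA, stepB, if_neg h1, if_neg h2, if_neg h3]
      rw [show pre.drop start ++ [c] = (pre ++ [c]).drop start from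
        (List.drop_append_of_le_length hstart).symm, hlen]
      exact ih (pre ++ [c]) args depth start hfull' (le_trans hstart (by simp))

-- the main induction: A's recursion equals parse-then-render at every fuel
-- split_top_level_generic returns None exactly on the fallback condition
theorem split_none_iff (t : String) :
    split_top_level_generic t = none ↔
      (PySem.Str.find t "<" = -1 ∨ ¬ PySem.Str.endswith t ">") := by
  simp only [split_top_level_generic]
  split_ifs with hc
  · exact iff_of_true rfl hc
  · exact iff_of_false (by simp) hc

set_option maxRecDepth 4096 in
theorem canonicalizeBase_empty : canonicalizeBase "" = "" := by decide

-- the main induction: A's recursion equals parse-then-render at every fuel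
set_option maxHeartbeats 1600000 in
theorem go_eq_render_parse : ∀ (fuel : Nat) (s : String),
    canonTypeGo fuel s = renderB (parseB fuel (normalizeTy s)) := by
  intro fuel
  induction fuel with
  | zero =>
    intro s
    simp only [canonTypeGo, parseB, renderB]
    exact canonicalizeBase_empty.symm
  | succ fuel ih =>
    intro s
    simp only [canonTypeGo, parseB]
    set n := normalizeTy s with hn
    cases hsplit : split_top_level_generic n with
    | none =>
      rw [if_pos ((split_none_iff n).mp hsplit)]
      rfl
    | some pr =>
      have hcond : ¬ (PySem.Str.find n "<" = -1 ∨ ¬ PySem.Str.endswith n ">") := by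
        intro hc
        rw [(split_none_iff n).mpr hc] at hsplit
        simp at hsplit
      rw [if_neg hcond]
      set inn := PySem.Str.slice n (some (PySem.Str.find n "<" + 1)) (some (-1)) with hinn
      obtain ⟨base, argsF⟩ := pr
      have hsplit' := hsplit
      simp only [split_top_level_generic] at hsplit'
      rw [if_neg hcond] at hsplit'
      rw [← hinn] at hsplit'
      have hpair := Option.some.inj hsplit'
      rw [Prod.mk.injEq] at hpair
      obtain ⟨hbase, hargs⟩ := hpair
      change (canonicalizeBase base ++ "<" ++
        PySem.Str.join ", " (List.map (canonTypeGo fuel) argsF) ++ ">") = _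
      simp only [renderB, renderList_ofList]
      rw [← hbase, ← hargs]
      have key := split_loop_rel inn (fun p => parseB fuel (normalizeTy p))
        inn.toList [] [] 0 0 (by simp) (by simp)
      simp only [List.drop_nil, List.length_nil, Nat.cast_zero, List.map_nil] at key
      rw [key, List.map_map]
      have hmap : ∀ l : List String, l.map (canonTypeGo fuel)
          = l.map (renderB ∘ fun p => parseB fuel (normalizeTy p)) :=
        fun l => List.map_congr_left (fun p _ => ih p)
      rw [hmap]

-- ===== VERDICT (by name: the statement is the Claim_ definition above) =====
theorem canonicalize_type_spec : Claim_equal_canonicalize_type := by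
  intro type_name _
  unfold Spec_canonicalize_type canonicalize_type canonicalize_type_alt
  exact go_eq_render_parse _ type_name
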